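-- pv_equiv track=rewrite | github.com/ddubab/algo-test | programmers/Level2/빛의 경로 사이클.py | solution
-- ===== SOURCE A (Python) =====
-- from collections import deque
--
-- def solution(grid):
--     answer = []
--     visited = dict()
--
--     n = len(grid)
--     m = len(grid[0])
--
--     dx = [0,1,0,-1]
--     dy = [1,0,-1,0]
--
--     awd_cnt = []
--     idx = 0
--     for ii in range(n):
--         for jj in range(m):
--             for i in range(4):
--                 q = deque()
--                 q.append([ii,jj,i])
--                 cnt = 0
--
--                 while q:
--                     x,y,di = q.popleft()
--                     if (x,y) not in visited:
--                         visited[(x,y)] = set()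
--                         visited[(x,y)].add(di)
--                     else:
--                         if di in visited[(x,y)]:
--                             break
--                         else:
--                             visited[(x,y)].add(di)
--
--                     if grid[x][y] == 'L':
--                         di -=1
--                         if di<0:
--                             di = 3
--
--                     elif grid[x][y] == 'R':
--                         di +=1
--                         if di>3:
--                             di = 0
--
--                     nx = x+dx[di]
--                     ny = y+dy[di]
--                     if nx<0:
--                         nx = n-1
--                     elif nx>=n:
--                         nx = 0
--                     if ny<0:
--                         ny = m-1
--                     elif ny>=m:
--                         ny = 0
--
--                     q.append([nx,ny,di])
--                     cnt+=1
--
--                 if cnt!=0: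
--                     awd_cnt.append(cnt)
--
--     awd_cnt.sort()
--     return awd_cnt
-- ===== SOURCE B (Python) =====
-- def solution(grid):
--     n = len(grid)
--     m = len(grid[0])
--
--     # State (x, y, d) with incoming direction d (0:right,1:down,2:left,3:up),
--     # encoded as s = (x*m + y)*4 + d, evolves by a permutation `step` of the
--     # 4*n*m states.  A cycle is counted exactly once, at its smallest state in
--     # scan order: walk the cycle from each s with early exit as soon as a
--     # smaller state appears; no visited bookkeeping of any kind is needed.
--     def step(s):
--         x, r = divmod(s, 4 * m)
--         y, d = divmod(r, 4)
--         c = grid[x][y]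
--         if c == 'L':
--             d = (d + 3) % 4
--         elif c == 'R':
--             d = (d + 1) % 4
--         x = (x + (1 if d == 1 else -1 if d == 3 else 0)) % n
--         y = (y + (1 if d == 0 else -1 if d == 2 else 0)) % m
--         return (x * m + y) * 4 + d
--
--     lengths = []
--     for s in range(4 * n * m):
--         cur = step(s)
--         length = 1
--         while cur > s:
--             cur = step(cur)
--             length += 1
--         if cur == s:
--             lengths.append(length)
--     lengths.sort()
--     return lengths
-- ===== Notes on version B (the rewrite author's own statement) =====
-- stated objective: alternative
-- what changed: Replaces A's visited dict-of-sets / deque bookkeeping by a memoryless canonical-representative method: every state walks its own cycle with an early exit as soon as a smaller state appears, and a cycle's length is recorded exactly at its scan-order-minimal state, so no visited structure exists at all.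
-- outside the precondition, e.g. on solution([]): A raises IndexError, B raises IndexError; on solution(['LL', 'L']): A raises IndexError, B raises IndexError
import Mathlib
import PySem

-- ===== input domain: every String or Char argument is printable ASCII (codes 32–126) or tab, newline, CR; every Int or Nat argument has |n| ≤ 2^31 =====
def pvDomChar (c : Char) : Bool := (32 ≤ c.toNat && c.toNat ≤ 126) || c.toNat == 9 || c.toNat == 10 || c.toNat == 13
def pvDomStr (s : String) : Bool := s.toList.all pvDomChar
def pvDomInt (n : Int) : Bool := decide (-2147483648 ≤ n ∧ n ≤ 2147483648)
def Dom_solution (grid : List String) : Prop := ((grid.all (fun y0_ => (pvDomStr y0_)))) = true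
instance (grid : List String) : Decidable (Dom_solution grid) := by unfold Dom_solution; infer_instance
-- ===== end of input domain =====

-- B replaces A's visited dict-of-sets/deque bookkeeping by a memoryless canonical-representative
-- method: each state walks its own cycle with an early exit on any smaller state, and a cycle is
-- counted exactly at its minimal state (alternative decomposition; no speed claim).

-- ===== PORT A =====
-- grid[x][y] as both Pythons read it; the defaults are never hit on Pre_ (x,y in range, rows ≥ len(grid[0]))
def gridAt (grid : List String) (x y : Int) : Char :=
  (PySem.Str.pyGet? (PySem.List.pyGetD grid x "") y).getD ' '

-- A's inline turn:  di-=1; if di<0: di=3  /  di+=1; if di>3: di=0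
def turnA (c : Char) (di : Int) : Int :=
  if c = 'L' then (if di - 1 < 0 then 3 else di - 1)
  else if c = 'R' then (if di + 1 > 3 then 0 else di + 1)
  else di

-- A's inline wrap-around:  if v<0: v=lim-1  elif v>=lim: v=0
def wrapA (lim v : Int) : Int :=
  if v < 0 then lim - 1 else if v ≥ lim then 0 else v

def aDx : List Int := [0, 1, 0, -1]
def aDy : List Int := [1, 0, -1, 0]

-- A's 'while q' loop; the deque q holds the single pending state; fuel (4*n*m+1) is
-- always sufficient, since every non-breaking iteration marks an unmarked state.
def aWalk (grid : List String) (n m : Int) :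
    Nat → List (Int × Int × Int) → PySem.Dict (Int × Int) (PySem.Set Int) → Int →
    PySem.Dict (Int × Int) (PySem.Set Int) × Int
  | 0, _, visited, cnt => (visited, cnt)
  | _ + 1, [], visited, cnt => (visited, cnt)
  | fuel + 1, (x, y, di0) :: rest, visited, cnt =>
      let visited? : Option (PySem.Dict (Int × Int) (PySem.Set Int)) :=
        match visited.get? (x, y) with
        | none => some (visited.insert (x, y) (PySem.Set.add PySem.Set.empty di0))
        | some s =>
            if PySem.Set.contains s di0 then none
            else some (visited.insert (x, y) (PySem.Set.add s di0))
      match visited? with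
      | none => (visited, cnt)   -- 'break'
      | some visited' =>
          let di := turnA (gridAt grid x y) di0
          let nx := wrapA n (x + PySem.List.pyGetD aDx di 0)
          let ny := wrapA m (y + PySem.List.pyGetD aDy di 0)
          aWalk grid n m fuel (rest ++ [(nx, ny, di)]) visited' (cnt + 1)

def solution (grid : List String) : List Int :=
  let n : Int := PySem.List.len grid
  let m : Int := PySem.Str.len (PySem.List.pyGetD grid 0 "")   -- grid[0]; grid = [] raises, excluded by Pre_
  let fuel := (4 * n * m).toNat + 1
  let res := (PySem.List.pyRange 0 n 1).foldl (fun st ii =>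
      (PySem.List.pyRange 0 m 1).foldl (fun st jj =>
        (PySem.List.pyRange 0 4 1).foldl
          (fun (st : PySem.Dict (Int × Int) (PySem.Set Int) × List Int) i =>
            let w := aWalk grid n m fuel [(ii, jj, i)] st.1 0
            (w.1, if w.2 ≠ 0 then st.2 ++ [w.2] else st.2)) st) st)
    (PySem.Dict.empty, ([] : List Int))
  PySem.List.sorted res.2 (fun v => v) false

-- ===== PORT B =====
-- Source B's `step`: decode s, turn by the cell, move with wrap, re-encode
def bNextOf (grid : List String) (n m : Int) (s : Int) : Int :=
  let x := PySem.Int.floordiv s (4 * m)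
  let r := PySem.Int.mod s (4 * m)
  let y := PySem.Int.floordiv r 4
  let d0 := PySem.Int.mod r 4
  let c := gridAt grid x y
  let d := if c = 'L' then PySem.Int.mod (d0 + 3) 4
           else if c = 'R' then PySem.Int.mod (d0 + 1) 4
           else d0
  let nx := PySem.Int.mod (x + (if d = 1 then 1 else if d = 3 then -1 else 0)) n
  let ny := PySem.Int.mod (y + (if d = 0 then 1 else if d = 2 then -1 else 0)) m
  (nx * m + ny) * 4 + d

-- Source B's 'while cur > s: cur = step(cur); length += 1'; fuel 4*n*m+1 always suffices
-- (the walk returns to s after at most 4*n*m steps since step is a permutation)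
def bLoop (grid : List String) (n m s : Int) : Nat → Int → Int → Int × Int
  | 0, cur, len => (cur, len)
  | fuel + 1, cur, len =>
      if s < cur then bLoop grid n m s fuel (bNextOf grid n m cur) (len + 1)
      else (cur, len)

def solution_alt (grid : List String) : List Int :=
  let n : Int := PySem.List.len grid
  let m : Int := PySem.Str.len (PySem.List.pyGetD grid 0 "")   -- grid[0]; grid = [] raises, excluded by Pre_
  let N := 4 * n * m
  let fuel := N.toNat + 1
  let res := (PySem.List.pyRange 0 N 1).foldl
    (fun (out : List Int) s =>
      let w := bLoop grid n m s fuel (bNextOf grid n m s) 1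
      if w.1 = s then out ++ [w.2] else out) []
  PySem.List.sorted res (fun v => v) false

-- ===== PRECONDITION & SPEC =====
-- Pre_ excludes exactly the inputs where A raises IndexError: the empty grid (grid[0]),
-- and grids where some row is shorter than the first row (grid[x][y] with y < len(grid[0])).
def Pre_solution (grid : List String) : Prop :=
  grid ≠ [] ∧ ∀ row ∈ grid, (grid.headD "").length ≤ row.length
instance (grid : List String) : Decidable (Pre_solution grid) := by
  unfold Pre_solution; infer_instance

def pvWitness_solution : List String := ["SL", "RR"]

def Spec_solution (grid : List String) (out : List Int) : Prop := out = solution_alt grid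
instance (grid : List String) (out : List Int) : Decidable (Spec_solution grid out) := by
  unfold Spec_solution; infer_instance

-- ===== CLAIM (what is proved, stated in full; the proofs are below) =====
def Claim_equal_solution : Prop :=
  ∀ (grid : List String), Dom_solution grid → Pre_solution grid → Spec_solution grid (solution grid)

-- ===== LEMMAS AND PROOFS =====

-- proof-layer intermediate: the seen-set cycle walk over encoded states with a
-- precomputed successor table (bridges A's dict-of-sets walk to B's walk)
def bNxt (grid : List String) (n m : Int) : List Int :=
  (PySem.List.pyRange 0 (4 * n * m) 1).map (bNextOf grid n m)

def midWalk (nxt : List Int) : Nat → Int → PySem.Set Int → Int → PySem.Set Int × Int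
  | 0, _, seen, cnt => (seen, cnt)
  | fuel + 1, cur, seen, cnt =>
      if PySem.Set.contains seen cur then (seen, cnt)
      else midWalk nxt fuel (PySem.List.pyGetD nxt cur 0) (PySem.Set.add seen cur) (cnt + 1)

def midSolution (grid : List String) : List Int :=
  let n : Int := PySem.List.len grid
  let m : Int := PySem.Str.len (PySem.List.pyGetD grid 0 "")
  let N := 4 * n * m
  let nxt := bNxt grid n m
  let fuel := N.toNat + 1
  let res := (PySem.List.pyRange 0 N 1).foldl
    (fun (st : PySem.Set Int × List Int) s =>
      if PySem.Set.contains st.1 s then st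
      else
        let w := midWalk nxt fuel s st.1 0
        (w.1, st.2 ++ [w.2]))
    (PySem.Set.empty, [])
  PySem.List.sorted res.2 (fun v => v) false

-- ---------- stage 1: solution = midSolution (A's walk ≡ encoded seen-set walk) ----------

lemma enc_nonneg {m x y d : Int} (hx : 0 ≤ x) (hy : 0 ≤ y) (hm : 0 ≤ m) (hd : 0 ≤ d) :
    0 ≤ (x*m+y)*4+d := by positivity

lemma enc_lt {n m x y d : Int} (_hx : 0 ≤ x) (hxn : x < n) (hy : 0 ≤ y) (hym : y < m)
    (hd : d < 4) : (x*m+y)*4+d < 4*n*m := by nlinarith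

lemma enc_inj {m x y d x' y' d' : Int} (hy : 0 ≤ y) (hym : y < m) (hd : 0 ≤ d) (hd4 : d < 4)
    (hy' : 0 ≤ y') (hym' : y' < m) (hd' : 0 ≤ d') (hd4' : d' < 4)
    (h : (x*m+y)*4+d = (x'*m+y')*4+d') : x = x' ∧ y = y' ∧ d = d' := by
  have hd0 : d = d' := by
    have h1 : ((x*m+y)*4+d) % 4 = ((x'*m+y')*4+d') % 4 := by rw [h]
    have e1 : (x*m+y)*4+d = d + (x*m+y)*4 := by ring
    have e2 : (x'*m+y')*4+d' = d' + (x'*m+y')*4 := by ring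
    rw [e1, e2, Int.add_mul_emod_self_right, Int.add_mul_emod_self_right,
        Int.emod_eq_of_lt hd hd4, Int.emod_eq_of_lt hd' hd4'] at h1
    exact h1
  have hu : x*m+y = x'*m+y' := by linarith
  have hx : x = x' := by
    rcases lt_trichotomy x x' with hlt | heq | hgt
    · nlinarith
    · exact heq
    · nlinarith
  refine ⟨hx, ?_, hd0⟩
  subst hx; linarith

lemma decode_x {m x y d : Int} (hm : 0 < m) (hy : 0 ≤ y) (hym : y < m) (hd : 0 ≤ d) (hd4 : d < 4) :
    PySem.Int.floordiv ((x*m+y)*4+d) (4*m) = x := by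
  rw [PySem.Int.floordiv_eq_ediv_of_pos (by linarith)]
  have e : (x*m+y)*4+d = (4*y+d) + x*(4*m) := by ring
  rw [e, Int.add_mul_ediv_right _ _ (by linarith : (4*m:Int) ≠ 0),
      Int.ediv_eq_zero_of_lt (by linarith) (by linarith)]
  ring

lemma decode_r {m x y d : Int} (hm : 0 < m) (hy : 0 ≤ y) (hym : y < m) (hd : 0 ≤ d) (hd4 : d < 4) :
    PySem.Int.mod ((x*m+y)*4+d) (4*m) = 4*y+d := by
  rw [PySem.Int.mod_eq_emod_of_pos (by linarith)]
  have e : (x*m+y)*4+d = (4*y+d) + x*(4*m) := by ring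
  rw [e, Int.add_mul_emod_self_right, Int.emod_eq_of_lt (by linarith) (by linarith)]

lemma decode_y {y d : Int} (hd : 0 ≤ d) (hd4 : d < 4) :
    PySem.Int.floordiv (4*y+d) 4 = y := by
  rw [PySem.Int.floordiv_eq_ediv_of_pos (by norm_num)]
  have e : 4*y+d = d + y*4 := by ring
  rw [e, Int.add_mul_ediv_right _ _ (by norm_num : (4:Int) ≠ 0),
      Int.ediv_eq_zero_of_lt hd hd4]
  ring

lemma decode_d {y d : Int} (hd : 0 ≤ d) (hd4 : d < 4) :
    PySem.Int.mod (4*y+d) 4 = d := by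
  rw [PySem.Int.mod_eq_emod_of_pos (by norm_num)]
  have e : 4*y+d = d + y*4 := by ring
  rw [e, Int.add_mul_emod_self_right, Int.emod_eq_of_lt hd hd4]

lemma turnA_bounds (c : Char) {d : Int} (hd : 0 ≤ d) (hd4 : d < 4) :
    0 ≤ turnA c d ∧ turnA c d < 4 := by
  unfold turnA; split_ifs <;> omega

lemma wrapA_bounds {lim : Int} (v : Int) (h : 0 < lim) :
    0 ≤ wrapA lim v ∧ wrapA lim v < lim := by
  unfold wrapA; split_ifs <;> omega

lemma wrap_eq_mod {lim v : Int} (h : 0 < lim) (hv : -1 ≤ v) (hv2 : v ≤ lim) :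
    PySem.Int.mod v lim = wrapA lim v := by
  rw [PySem.Int.mod_eq_emod_of_pos h]; unfold wrapA
  split_ifs with h1 h2
  · have hv1 : v = -1 := by omega
    subst hv1
    have e : (-1 : Int) + lim * 1 = lim - 1 := by ring
    rw [show (-1 : Int) = -1 from rfl, ← Int.add_mul_emod_self_left (a := (-1:Int)) (b := lim) (c := 1),
        e, Int.emod_eq_of_lt (by omega) (by omega)]
  · have hv1 : v = lim := by omega
    subst hv1; exact Int.emod_self
  · exact Int.emod_eq_of_lt (by omega) (by omega)

lemma turnB_eq (c : Char) {d : Int} (hd : 0 ≤ d) (hd4 : d < 4) :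
    (if c = 'L' then PySem.Int.mod (d + 3) 4
     else if c = 'R' then PySem.Int.mod (d + 1) 4 else d) = turnA c d := by
  unfold turnA
  interval_cases d <;> split_ifs <;> first | decide | omega

lemma dxB_eq {d : Int} (hd : 0 ≤ d) (hd4 : d < 4) :
    (if d = 1 then (1:Int) else if d = 3 then -1 else 0) = PySem.List.pyGetD aDx d 0 := by
  interval_cases d <;> decide

lemma dyB_eq {d : Int} (hd : 0 ≤ d) (hd4 : d < 4) :
    (if d = 0 then (1:Int) else if d = 2 then -1 else 0) = PySem.List.pyGetD aDy d 0 := by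
  interval_cases d <;> decide

lemma dx_bounds {d : Int} (hd : 0 ≤ d) (hd4 : d < 4) :
    -1 ≤ PySem.List.pyGetD aDx d 0 ∧ PySem.List.pyGetD aDx d 0 ≤ 1 := by
  interval_cases d <;> decide

lemma dy_bounds {d : Int} (hd : 0 ≤ d) (hd4 : d < 4) :
    -1 ≤ PySem.List.pyGetD aDy d 0 ∧ PySem.List.pyGetD aDy d 0 ≤ 1 := by
  interval_cases d <;> decide

-- B's successor of the encoded state is the encoding of A's successor
lemma next_eq (grid : List String) (n m : Int) (hn : 0 < n) (hm : 0 < m)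
    {x y d : Int} (hx : 0 ≤ x) (hxn : x < n) (hy : 0 ≤ y) (hym : y < m)
    (hd : 0 ≤ d) (hd4 : d < 4) :
    bNextOf grid n m ((x*m+y)*4+d) =
      (wrapA n (x + PySem.List.pyGetD aDx (turnA (gridAt grid x y) d) 0) * m +
       wrapA m (y + PySem.List.pyGetD aDy (turnA (gridAt grid x y) d) 0)) * 4 +
      turnA (gridAt grid x y) d := by
  have hb := turnA_bounds (gridAt grid x y) hd hd4
  have hdx := dx_bounds hb.1 hb.2
  have hdy := dy_bounds hb.1 hb.2
  simp only [bNextOf]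
  rw [decode_x hm hy hym hd hd4, decode_r hm hy hym hd hd4, decode_y hd hd4, decode_d hd hd4,
      turnB_eq _ hd hd4, dxB_eq hb.1 hb.2, dyB_eq hb.1 hb.2,
      wrap_eq_mod hn (by omega) (by omega), wrap_eq_mod hm (by omega) (by omega)]

def InvRel (m : Int) (visited : PySem.Dict (Int × Int) (PySem.Set Int)) (seen : PySem.Set Int) : Prop :=
  ∀ x y d : Int, 0 ≤ x → 0 ≤ y → y < m → 0 ≤ d → d < 4 →
    ((∃ s, visited.get? (x, y) = some s ∧ d ∈ s) ↔ ((x*m+y)*4+d) ∈ seen)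

lemma nxt_get (grid : List String) {n m s : Int} (h0 : 0 ≤ s) (h1 : s < 4*n*m) :
    PySem.List.pyGetD (bNxt grid n m) s 0 = bNextOf grid n m s := by
  unfold bNxt
  rw [PySem.List.pyGetD_map_pyRange_of_nonneg _ _ _ _ h0 h1]

lemma inv_insert {m : Int} {visited : PySem.Dict (Int × Int) (PySem.Set Int)}
    {seen : PySem.Set Int} {x y d : Int}
    (hy : 0 ≤ y) (hym : y < m) (hd : 0 ≤ d) (hd4 : d < 4)
    (hInv : InvRel m visited seen) (snew : PySem.Set Int)
    (hsnew : ∀ d', d' ∈ snew ↔ (∃ s0, visited.get? (x, y) = some s0 ∧ d' ∈ s0) ∨ d' = d) :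
    InvRel m (visited.insert (x, y) snew) (PySem.Set.add seen ((x*m+y)*4+d)) := by
  intro x' y' d' hx' hy' hym' hd' hd4'
  rw [PySem.Set.mem_add]
  by_cases hxy : (x', y') = (x, y)
  · obtain ⟨hx1, hy1⟩ := Prod.mk.injEq .. ▸ hxy
    subst hx1; subst hy1
    rw [PySem.Dict.get?_insert_self]
    constructor
    · rintro ⟨s, hs, hmem⟩
      obtain rfl : snew = s := by injection hs
      rcases (hsnew d').1 hmem with hold | rfl
      · exact Or.inl ((hInv x' y' d' hx' hy' hym' hd' hd4').1 hold)
      · exact Or.inr rfl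
    · rintro (hseen | henc)
      · exact ⟨snew, rfl, (hsnew d').2 (Or.inl ((hInv x' y' d' hx' hy' hym' hd' hd4').2 hseen))⟩
      · have : d' = d := by
          have := enc_inj hy' hym' hd' hd4' hy hym hd hd4 henc
          exact this.2.2
        exact ⟨snew, rfl, (hsnew d').2 (Or.inr this)⟩
  · rw [PySem.Dict.get?_insert_of_ne _ _ hxy]
    have henc : ¬ ((x'*m+y')*4+d' = (x*m+y)*4+d) := by
      intro h
      obtain ⟨h1, h2, h3⟩ := enc_inj hy' hym' hd' hd4' hy hym hd hd4 h
      exact hxy (by rw [h1, h2])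
    simp only [henc, or_false]
    exact hInv x' y' d' hx' hy' hym' hd' hd4'

lemma midWalk_cnt_le (nxt : List Int) :
    ∀ (f : Nat) (cur : Int) (seen : PySem.Set Int) (cnt : Int),
      cnt ≤ (midWalk nxt f cur seen cnt).2 := by
  intro f
  induction f with
  | zero => intro cur seen cnt; simp [midWalk]
  | succ f ih =>
      intro cur seen cnt
      simp only [midWalk]
      split
      · exact le_refl _
      · exact le_trans (by omega) (ih _ _ (cnt + 1))

lemma walk_eq (grid : List String) {n m : Int} (hn : 0 < n) :
    ∀ (fuel : Nat) (x y d cnt : Int) (visited : PySem.Dict (Int × Int) (PySem.Set Int))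
      (seen : PySem.Set Int),
      0 ≤ x → x < n → 0 ≤ y → y < m → 0 ≤ d → d < 4 → InvRel m visited seen →
      (aWalk grid n m fuel [(x, y, d)] visited cnt).2 =
        (midWalk (bNxt grid n m) fuel ((x*m+y)*4+d) seen cnt).2 ∧
      InvRel m (aWalk grid n m fuel [(x, y, d)] visited cnt).1
        (midWalk (bNxt grid n m) fuel ((x*m+y)*4+d) seen cnt).1 := by
  intro fuel
  induction fuel with
  | zero =>
      intro x y d cnt visited seen hx hxn hy hym hd hd4 hInv
      exact ⟨rfl, hInv⟩
  | succ f ih =>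
      intro x y d cnt visited seen hx hxn hy hym hd hd4 hInv
      have hm : 0 < m := by omega
      have hbd := turnA_bounds (gridAt grid x y) hd hd4
      have hwx := wrapA_bounds (x + PySem.List.pyGetD aDx (turnA (gridAt grid x y) d) 0) hn
      have hwy := wrapA_bounds (y + PySem.List.pyGetD aDy (turnA (gridAt grid x y) d) 0) hm
      cases hvis : visited.get? (x, y) with
      | none =>
          have hseen : ¬ ((x*m+y)*4+d) ∈ seen := by
            intro hmem
            rcases (hInv x y d hx hy hym hd hd4).2 hmem with ⟨s, hs, _⟩
            rw [hvis] at hs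
            exact Option.some_ne_none s hs.symm
          have hcont : PySem.Set.contains seen ((x*m+y)*4+d) = false := by
            rw [← Bool.not_eq_true, PySem.Set.contains_iff]; exact hseen
          have hInv' := inv_insert hy hym hd hd4 hInv
            (PySem.Set.add PySem.Set.empty d)
            (by intro d'; rw [hvis]; simp [PySem.Set.empty])
          simp only [aWalk, midWalk, hvis, hcont, Bool.false_eq_true, if_false, List.nil_append]
          rw [nxt_get grid (enc_nonneg hx hy (by omega) hd) (enc_lt hx hxn hy hym hd4),
              next_eq grid n m hn hm hx hxn hy hym hd hd4]
          exact ih _ _ _ _ _ _ hwx.1 hwx.2 hwy.1 hwy.2 hbd.1 hbd.2 hInv'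
      | some s =>
          cases hmem : PySem.Set.contains s d with
          | true =>
              have hseen : ((x*m+y)*4+d) ∈ seen :=
                (hInv x y d hx hy hym hd hd4).1 ⟨s, hvis, (PySem.Set.contains_iff ..).1 hmem⟩
              have hcont : PySem.Set.contains seen ((x*m+y)*4+d) = true := by
                rw [PySem.Set.contains_iff]; exact hseen
              simp only [aWalk, midWalk, hvis, hmem, hcont, if_true]
              exact ⟨by trivial, hInv⟩
          | false =>
              have hseen : ¬ ((x*m+y)*4+d) ∈ seen := by
                intro hmemS
                rcases (hInv x y d hx hy hym hd hd4).2 hmemS with ⟨s', hs', hds'⟩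
                rw [hvis] at hs'
                obtain rfl : s = s' := by injection hs'
                rw [← PySem.Set.contains_iff] at hds'
                rw [hmem] at hds'; exact Bool.noConfusion hds'
              have hcont : PySem.Set.contains seen ((x*m+y)*4+d) = false := by
                rw [← Bool.not_eq_true, PySem.Set.contains_iff]; exact hseen
              have hInv' := inv_insert hy hym hd hd4 hInv (PySem.Set.add s d)
                (by
                  intro d'
                  rw [hvis, PySem.Set.mem_add]
                  constructor
                  · rintro (h | h)
                    · exact Or.inl ⟨s, rfl, h⟩
                    · exact Or.inr h
                  · rintro (⟨s0, hs0, h⟩ | h)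
                    · obtain rfl : s = s0 := by injection hs0
                      exact Or.inl h
                    · exact Or.inr h)
              simp only [aWalk, midWalk, hvis, hmem, hcont, Bool.false_eq_true, if_false,
                List.nil_append]
              rw [nxt_get grid (enc_nonneg hx hy (by omega) hd) (enc_lt hx hxn hy hym hd4),
                  next_eq grid n m hn hm hx hxn hy hym hd hd4]
              exact ih _ _ _ _ _ _ hwx.1 hwx.2 hwy.1 hwy.2 hbd.1 hbd.2 hInv'

lemma pyRange_shift (a b : Int) :
    PySem.List.pyRange a (a + b) 1 = (PySem.List.pyRange 0 b 1).map (a + ·) := by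
  rw [PySem.List.pyRange_one, PySem.List.pyRange_one]
  simp only [add_sub_cancel_left, sub_zero, List.map_map]
  exact List.map_congr_left (fun k _ => by simp)

lemma pyRange_mul (k : Nat) (b : Int) (hb : 0 ≤ b) :
    PySem.List.pyRange 0 ((k : Int) * b) 1 =
      (PySem.List.pyRange 0 (k : Int) 1).flatMap
        (fun i => (PySem.List.pyRange 0 b 1).map (fun j => i * b + j)) := by
  induction k with
  | zero => simp [PySem.List.pyRange_one_eq_nil]
  | succ k ih =>
      have h1 : ((k + 1 : Nat) : Int) * b = (k : Int) * b + b := by push_cast; ring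
      have h2 : ((k + 1 : Nat) : Int) = (k : Int) + 1 := by push_cast; ring
      rw [h1, h2, PySem.List.pyRange_one_append 0 ((k : Int) * b) ((k : Int) * b + b)
            (by positivity) (by omega),
          PySem.List.pyRange_one_succ_right (by positivity), ih,
          List.flatMap_append, pyRange_shift ((k : Int) * b) b]
      simp

def startsL (n m : Int) : List (Int × Int × Int) :=
  (PySem.List.pyRange 0 n 1).flatMap (fun ii =>
    (PySem.List.pyRange 0 m 1).flatMap (fun jj =>
      (PySem.List.pyRange 0 4 1).map (fun i => (ii, jj, i))))

lemma starts_bounds {n m : Int} {t : Int × Int × Int} (ht : t ∈ startsL n m) :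
    0 ≤ t.1 ∧ t.1 < n ∧ 0 ≤ t.2.1 ∧ t.2.1 < m ∧ 0 ≤ t.2.2 ∧ t.2.2 < 4 := by
  unfold startsL at ht
  simp only [List.mem_flatMap, List.mem_map] at ht
  obtain ⟨ii, hii, jj, hjj, i, hi, rfl⟩ := ht
  rw [PySem.List.mem_pyRange_one] at hii hjj hi
  exact ⟨hii.1, hii.2, hjj.1, hjj.2, hi.1, hi.2⟩

lemma range_decomp {n m : Int} (hn : 0 ≤ n) (hm : 0 ≤ m) :
    PySem.List.pyRange 0 (4 * n * m) 1 =
      (startsL n m).map (fun t => (t.1 * m + t.2.1) * 4 + t.2.2) := by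
  lift n to ℕ using hn with nn
  lift m to ℕ using hm with mm
  have h1 : 4 * (nn : Int) * (mm : Int) = (nn : Int) * (4 * mm) := by ring
  rw [h1, pyRange_mul nn (4 * mm) (by positivity)]
  unfold startsL
  simp only [List.map_flatMap, List.map_map]
  apply List.flatMap_congr
  intro ii _
  have h2 : 4 * (mm : Int) = (mm : Int) * 4 := by ring
  rw [h2, pyRange_mul mm 4 (by norm_num)]
  simp only [List.map_flatMap, List.map_map]
  apply List.flatMap_congr
  intro jj _
  apply List.map_congr_left
  intro i _
  simp only [Function.comp]
  ring

lemma fold_eq (grid : List String) {n m : Int} (hn : 0 < n) (F : Nat) (hF : 0 < F) :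
    ∀ (starts : List (Int × Int × Int)) (visited : PySem.Dict (Int × Int) (PySem.Set Int))
      (seen : PySem.Set Int) (awd : List Int),
      (∀ t ∈ starts, 0 ≤ t.1 ∧ t.1 < n ∧ 0 ≤ t.2.1 ∧ t.2.1 < m ∧ 0 ≤ t.2.2 ∧ t.2.2 < 4) →
      InvRel m visited seen →
      (starts.foldl (fun st t =>
          let w := aWalk grid n m F [(t.1, t.2.1, t.2.2)] st.1 0
          (w.1, if w.2 ≠ 0 then st.2 ++ [w.2] else st.2)) (visited, awd)).2 =
      ((starts.map (fun t => (t.1 * m + t.2.1) * 4 + t.2.2)).foldl (fun st s =>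
          if PySem.Set.contains st.1 s then st
          else
            let w := midWalk (bNxt grid n m) F s st.1 0
            (w.1, st.2 ++ [w.2])) (seen, awd)).2 := by
  intro starts
  induction starts with
  | nil => intro visited seen awd _ _; rfl
  | cons t rest ih =>
      intro visited seen awd hb hInv
      obtain ⟨hx, hxn, hy, hym, hd, hd4⟩ := hb t (List.mem_cons_self ..)
      obtain ⟨F', rfl⟩ : ∃ F', F = F' + 1 := ⟨F - 1, by omega⟩
      have hbrest := fun t' ht' => hb t' (List.mem_cons_of_mem _ ht')
      simp only [List.map_cons, List.foldl_cons]
      by_cases hmem : ((t.1 * m + t.2.1) * 4 + t.2.2) ∈ seen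
      · -- start already visited: A breaks at once with cnt = 0, the mid layer skips
        obtain ⟨s, hvis, hds⟩ := (hInv t.1 t.2.1 t.2.2 hx hy hym hd hd4).2 hmem
        have hconts : PySem.Set.contains s t.2.2 = true := (PySem.Set.contains_iff ..).2 hds
        have hcont : PySem.Set.contains seen ((t.1 * m + t.2.1) * 4 + t.2.2) = true :=
          (PySem.Set.contains_iff ..).2 hmem
        simp only [aWalk, hvis, hconts, hcont, if_true, ne_eq, not_true_eq_false, if_false]
        exact ih visited seen awd hbrest hInv
      · have hcont : PySem.Set.contains seen ((t.1 * m + t.2.1) * 4 + t.2.2) = false := by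
          rw [← Bool.not_eq_true, PySem.Set.contains_iff]; exact hmem
        have hw := walk_eq grid hn (F' + 1) t.1 t.2.1 t.2.2 0 visited seen
          hx hxn hy hym hd hd4 hInv
        have hge : 1 ≤ (midWalk (bNxt grid n m) (F' + 1) ((t.1 * m + t.2.1) * 4 + t.2.2) seen 0).2 := by
          simp only [midWalk, hcont, Bool.false_eq_true, if_false]
          exact le_trans (by norm_num) (midWalk_cnt_le _ _ _ _ 1)
        have hne0 : (aWalk grid n m (F' + 1) [(t.1, t.2.1, t.2.2)] visited 0).2 ≠ 0 := by
          rw [hw.1]; omega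
        simp only [hcont, Bool.false_eq_true, if_false, hne0, ne_eq, not_false_eq_true, if_true]
        rw [hw.1]
        exact ih _ _ _ hbrest hw.2

lemma inv_empty (m : Int) : InvRel m PySem.Dict.empty PySem.Set.empty := by
  intro x y d _ _ _ _ _
  constructor
  · rintro ⟨s, hs, _⟩
    rw [PySem.Dict.get?_empty] at hs
    exact (Option.some_ne_none s hs.symm).elim
  · intro h; exact absurd h (List.not_mem_nil)

lemma nestedA (grid : List String) (n m : Int) (F : Nat)
    (init : PySem.Dict (Int × Int) (PySem.Set Int) × List Int) :
    (PySem.List.pyRange 0 n 1).foldl (fun st ii =>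
      (PySem.List.pyRange 0 m 1).foldl (fun st jj =>
        (PySem.List.pyRange 0 4 1).foldl
          (fun (st : PySem.Dict (Int × Int) (PySem.Set Int) × List Int) i =>
            let w := aWalk grid n m F [(ii, jj, i)] st.1 0
            (w.1, if w.2 ≠ 0 then st.2 ++ [w.2] else st.2)) st) st) init =
    (startsL n m).foldl (fun st t =>
      let w := aWalk grid n m F [(t.1, t.2.1, t.2.2)] st.1 0
      (w.1, if w.2 ≠ 0 then st.2 ++ [w.2] else st.2)) init := by
  unfold startsL
  simp only [List.foldl_flatMap, List.foldl_map]

lemma solution_eq_mid (grid : List String) (hne : grid ≠ []) :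
    solution grid = midSolution grid := by
  simp only [solution, midSolution]
  have hn : (0 : Int) < PySem.List.len grid := by
    rw [PySem.List.len_eq]
    exact_mod_cast List.length_pos_of_ne_nil hne
  have hm : (0 : Int) ≤ PySem.Str.len (PySem.List.pyGetD grid 0 "") := by
    rw [PySem.Str.len_eq]; positivity
  apply congrArg (fun l => PySem.List.sorted l (fun v => v) false)
  rw [nestedA, range_decomp (le_of_lt hn) hm]
  exact fold_eq grid hn _ (by positivity) (startsL _ _) _ _ _
    (fun t ht => starts_bounds ht) (inv_empty _)

-- ---------- stage 2: generic facts about iterating an injective self-map of [0, N) ----------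

lemma iter_mem (f : Int → Int) (N : Int)
    (hmap : ∀ u, 0 ≤ u → u < N → 0 ≤ f u ∧ f u < N) :
    ∀ (k : Nat) (s : Int), 0 ≤ s → s < N → 0 ≤ f^[k] s ∧ f^[k] s < N := by
  intro k
  induction k with
  | zero => intro s h0 h1; simpa using ⟨h0, h1⟩
  | succ k ih =>
      intro s h0 h1
      rw [Function.iterate_succ_apply']
      exact hmap _ (ih s h0 h1).1 (ih s h0 h1).2

lemma iter_cancel (f : Int → Int) (N : Int)
    (hmap : ∀ u, 0 ≤ u → u < N → 0 ≤ f u ∧ f u < N)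
    (hinj : ∀ u v, 0 ≤ u → u < N → 0 ≤ v → v < N → f u = f v → u = v) :
    ∀ (k : Nat) (u v : Int), 0 ≤ u → u < N → 0 ≤ v → v < N → f^[k] u = f^[k] v → u = v := by
  intro k
  induction k with
  | zero => intro u v _ _ _ _ h; simpa using h
  | succ k ih =>
      intro u v hu0 hu1 hv0 hv1 h
      rw [Function.iterate_succ_apply, Function.iterate_succ_apply] at h
      have hfu := hmap u hu0 hu1
      have hfv := hmap v hv0 hv1
      exact hinj u v hu0 hu1 hv0 hv1 (ih (f u) (f v) hfu.1 hfu.2 hfv.1 hfv.2 h)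

lemma exists_return (f : Int → Int) (N : Int)
    (hmap : ∀ u, 0 ≤ u → u < N → 0 ≤ f u ∧ f u < N)
    (hinj : ∀ u v, 0 ≤ u → u < N → 0 ≤ v → v < N → f u = f v → u = v)
    (s : Int) (h0 : 0 ≤ s) (h1 : s < N) :
    ∃ d : Nat, 0 < d ∧ d ≤ N.toNat ∧ f^[d] s = s := by
  have hmapsTo : ∀ a ∈ Finset.range (N.toNat + 1),
      (f^[a] s).toNat ∈ Finset.range N.toNat := by
    intro a _
    have h := iter_mem f N hmap a s h0 h1
    rw [Finset.mem_range]
    omega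
  have hcard : (Finset.range N.toNat).card < (Finset.range (N.toNat + 1)).card := by
    simp
  obtain ⟨i, hi, j, hj, hne, heq⟩ :=
    Finset.exists_ne_map_eq_of_card_lt_of_maps_to hcard hmapsTo
  rw [Finset.mem_range] at hi hj
  have hIJ : ∀ i j : Nat, i < j → j < N.toNat + 1 → (f^[i] s).toNat = (f^[j] s).toNat →
      ∃ d : Nat, 0 < d ∧ d ≤ N.toNat ∧ f^[d] s = s := by
    intro i j hij hjN heqn
    have hii := iter_mem f N hmap i s h0 h1
    have hjj := iter_mem f N hmap j s h0 h1
    have heqi : f^[i] s = f^[j] s := by omega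
    refine ⟨j - i, by omega, by omega, ?_⟩
    have hsplit : f^[i + (j - i)] s = f^[i] (f^[j-i] s) := Function.iterate_add_apply f i (j-i) s
    have hji : i + (j - i) = j := by omega
    rw [hji] at hsplit
    have hmemji := iter_mem f N hmap (j - i) s h0 h1
    exact iter_cancel f N hmap hinj i _ _ hmemji.1 hmemji.2 h0 h1 (by rw [← hsplit, ← heqi])
  rcases Nat.lt_or_ge i j with h | h
  · exact hIJ i j h hj heq
  · exact hIJ j i (by omega) hi heq.symm

lemma iter_period_mul (f : Int → Int) (s : Int) (p : Nat) (heq : f^[p] s = s) :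
    ∀ c : Nat, f^[p * c] s = s := by
  intro c
  induction c with
  | zero => simp
  | succ c ih =>
      rw [Nat.mul_succ, Function.iterate_add_apply, heq, ih]

lemma iter_period_mod (f : Int → Int) (s : Int) (p : Nat) (hp : 0 < p) (heq : f^[p] s = s) :
    ∀ a : Nat, f^[a] s = f^[a % p] s := by
  intro a
  conv_lhs => rw [← Nat.mod_add_div a p]
  rw [Function.iterate_add_apply, iter_period_mul f s p heq]

lemma fresh_all (f : Int → Int) (s : Int) (j0 : Nat) (hpos : 0 < j0)
    (heq : f^[j0] s = s) (hmin : ∀ j, 0 < j → j < j0 → s < f^[j] s) :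
    ∀ j : Nat, s ≤ f^[j] s := by
  intro j
  rw [iter_period_mod f s j0 hpos heq j]
  rcases Nat.eq_zero_or_pos (j % j0) with h | h
  · rw [h]; simp
  · exact le_of_lt (hmin _ h (Nat.mod_lt _ hpos))

lemma orbit_back (f : Int → Int) (N : Int)
    (hmap : ∀ u, 0 ≤ u → u < N → 0 ≤ f u ∧ f u < N)
    (hinj : ∀ u v, 0 ≤ u → u < N → 0 ≤ v → v < N → f u = f v → u = v)
    (t : Int) (h0 : 0 ≤ t) (h1 : t < N) (j : Nat) :
    ∃ j' : Nat, f^[j'] (f^[j] t) = t := by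
  obtain ⟨d, hd0, _, hdt⟩ := exists_return f N hmap hinj t h0 h1
  refine ⟨d * j - j, ?_⟩
  rw [← Function.iterate_add_apply]
  have : d * j - j + j = d * j := by
    have : j ≤ d * j := Nat.le_mul_of_pos_left j hd0
    omega
  rw [this]
  exact iter_period_mul f t d hdt j

-- ---------- stage 3: facts about bNextOf as a permutation of [0, 4nm) ----------

lemma exists_enc {n m s : Int} (hn : 0 < n) (hm : 0 < m) (h0 : 0 ≤ s) (h1 : s < 4*n*m) :
    ∃ x y d : Int, 0 ≤ x ∧ x < n ∧ 0 ≤ y ∧ y < m ∧ 0 ≤ d ∧ d < 4 ∧ s = (x*m+y)*4+d := by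
  have h4m : (0:Int) < 4*m := by linarith
  have hr0 : 0 ≤ s % (4*m) := Int.emod_nonneg s (by omega)
  have hrlt : s % (4*m) < 4*m := Int.emod_lt_of_pos s h4m
  refine ⟨s / (4*m), (s % (4*m)) / 4, (s % (4*m)) % 4,
    Int.ediv_nonneg h0 (by omega), ?_, Int.ediv_nonneg hr0 (by norm_num), ?_,
    Int.emod_nonneg _ (by norm_num), Int.emod_lt_of_pos _ (by norm_num), ?_⟩
  · rw [Int.ediv_lt_iff_lt_mul h4m]
    nlinarith
  · rw [Int.ediv_lt_iff_lt_mul (by norm_num : (0:Int) < 4)]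
    linarith
  · have h2 := Int.ediv_add_emod s (4*m)
    have h3 := Int.ediv_add_emod (s % (4*m)) 4
    linear_combination -h2 - h3

lemma wrapA_inj {lim x x' δ : Int} (hl : 0 < lim) (hx0 : 0 ≤ x) (hx1 : x < lim)
    (hx0' : 0 ≤ x') (hx1' : x' < lim) (hδ0 : -1 ≤ δ) (hδ1 : δ ≤ 1)
    (h : wrapA lim (x + δ) = wrapA lim (x' + δ)) : x = x' := by
  unfold wrapA at h
  split_ifs at h <;> omega

lemma turnA_inj (c : Char) {d d' : Int} (hd : 0 ≤ d) (hd4 : d < 4) (hd' : 0 ≤ d') (hd4' : d' < 4)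
    (h : turnA c d = turnA c d') : d = d' := by
  unfold turnA at h
  split_ifs at h <;> omega

lemma bNextOf_maps (grid : List String) {n m : Int} (hn : 0 < n) (hm : 0 < m) :
    ∀ u, 0 ≤ u → u < 4*n*m → 0 ≤ bNextOf grid n m u ∧ bNextOf grid n m u < 4*n*m := by
  intro u h0 h1
  obtain ⟨x, y, d, hx0, hx1, hy0, hy1, hd0, hd1, rfl⟩ := exists_enc hn hm h0 h1
  rw [next_eq grid n m hn hm hx0 hx1 hy0 hy1 hd0 hd1]
  have hb := turnA_bounds (gridAt grid x y) hd0 hd1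
  have hwx := wrapA_bounds (x + PySem.List.pyGetD aDx (turnA (gridAt grid x y) d) 0) hn
  have hwy := wrapA_bounds (y + PySem.List.pyGetD aDy (turnA (gridAt grid x y) d) 0) hm
  exact ⟨enc_nonneg hwx.1 hwy.1 (by omega) hb.1, enc_lt hwx.1 hwx.2 hwy.1 hwy.2 hb.2⟩

lemma bNextOf_inj (grid : List String) {n m : Int} (hn : 0 < n) (hm : 0 < m) :
    ∀ u v, 0 ≤ u → u < 4*n*m → 0 ≤ v → v < 4*n*m →
      bNextOf grid n m u = bNextOf grid n m v → u = v := by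
  intro u v hu0 hu1 hv0 hv1 h
  obtain ⟨x, y, d, hx0, hx1, hy0, hy1, hd0, hd1, rfl⟩ := exists_enc hn hm hu0 hu1
  obtain ⟨x', y', d', hx0', hx1', hy0', hy1', hd0', hd1', rfl⟩ := exists_enc hn hm hv0 hv1
  rw [next_eq grid n m hn hm hx0 hx1 hy0 hy1 hd0 hd1,
      next_eq grid n m hn hm hx0' hx1' hy0' hy1' hd0' hd1'] at h
  have hb := turnA_bounds (gridAt grid x y) hd0 hd1
  have hb' := turnA_bounds (gridAt grid x' y') hd0' hd1'
  have hwx := wrapA_bounds (x + PySem.List.pyGetD aDx (turnA (gridAt grid x y) d) 0) hn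
  have hwy := wrapA_bounds (y + PySem.List.pyGetD aDy (turnA (gridAt grid x y) d) 0) hm
  have hwx' := wrapA_bounds (x' + PySem.List.pyGetD aDx (turnA (gridAt grid x' y') d') 0) hn
  have hwy' := wrapA_bounds (y' + PySem.List.pyGetD aDy (turnA (gridAt grid x' y') d') 0) hm
  obtain ⟨hex, hey, hed⟩ := enc_inj hwy.1 hwy.2 hb.1 hb.2 hwy'.1 hwy'.2 hb'.1 hb'.2 h
  rw [hed] at hex hey
  have hdx := dx_bounds hb'.1 hb'.2
  have hdy := dy_bounds hb'.1 hb'.2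
  have hxx : x = x' := wrapA_inj hn hx0 hx1 hx0' hx1' hdx.1 hdx.2 hex
  have hyy : y = y' := wrapA_inj hm hy0 hy1 hy0' hy1' hdy.1 hdy.2 hey
  subst hxx; subst hyy
  have hdd : d = d' := turnA_inj (gridAt grid x y) hd0 hd1 hd0' hd1' hed
  rw [hdd]

-- ---------- stage 4: the two cycle walks against the iterates of bNextOf ----------

lemma bLoop_run (grid : List String) (n m s : Int) (j0 : Nat) (hj0 : 0 < j0)
    (hle : (bNextOf grid n m)^[j0] s ≤ s)
    (hmin : ∀ j, 0 < j → j < j0 → s < (bNextOf grid n m)^[j] s) :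
    ∀ (k i fuel : Nat), 0 < i → i + k = j0 → k < fuel →
      bLoop grid n m s fuel ((bNextOf grid n m)^[i] s) (i : Int)
        = ((bNextOf grid n m)^[j0] s, (j0 : Int)) := by
  intro k
  induction k with
  | zero =>
      intro i fuel hi hik hkf
      obtain ⟨fu, rfl⟩ : ∃ fu, fuel = fu + 1 := ⟨fuel - 1, by omega⟩
      obtain rfl : i = j0 := by omega
      simp only [bLoop, not_lt.2 hle, if_false]
  | succ k ih =>
      intro i fuel hi hik hkf
      obtain ⟨fu, rfl⟩ : ∃ fu, fuel = fu + 1 := ⟨fuel - 1, by omega⟩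
      have hlt : s < (bNextOf grid n m)^[i] s := hmin i hi (by omega)
      simp only [bLoop, hlt, if_true]
      have hstep : bNextOf grid n m ((bNextOf grid n m)^[i] s) = (bNextOf grid n m)^[i+1] s :=
        (Function.iterate_succ_apply' (bNextOf grid n m) i s).symm
      have hcast : (i : Int) + 1 = ((i + 1 : Nat) : Int) := by push_cast; ring
      rw [hstep, hcast]
      exact ih (i + 1) fu (by omega) (by omega) (by omega)

lemma midWalk_run (grid : List String) (n m s : Int) (hn : 0 < n) (hm : 0 < m)
    (hs0 : 0 ≤ s) (hsN : s < 4*n*m) (j0 : Nat) (hj0 : 0 < j0)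
    (heq : (bNextOf grid n m)^[j0] s = s)
    (hmin : ∀ j, 0 < j → j < j0 → s < (bNextOf grid n m)^[j] s)
    (P : Int → Prop)
    (hP : ∀ t, P t → ∃ j' : Nat, (bNextOf grid n m)^[j'] t < s) :
    ∀ (k i : Nat) (seen : PySem.Set Int) (cnt : Int) (fuel : Nat),
      i + k = j0 → k < fuel →
      (∀ t, t ∈ seen ↔ P t ∨ ∃ j : Nat, j < i ∧ (bNextOf grid n m)^[j] s = t) →
      ((midWalk (bNxt grid n m) fuel ((bNextOf grid n m)^[i] s) seen cnt).2
          = cnt + (j0 : Int) - (i : Int) ∧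
        ∀ t, t ∈ (midWalk (bNxt grid n m) fuel ((bNextOf grid n m)^[i] s) seen cnt).1 ↔
          P t ∨ ∃ j : Nat, j < j0 ∧ (bNextOf grid n m)^[j] s = t) := by
  have hall : ∀ j : Nat, s ≤ (bNextOf grid n m)^[j] s := fresh_all _ s j0 hj0 heq hmin
  intro k
  induction k with
  | zero =>
      intro i seen cnt fuel hik hkf hchar
      obtain ⟨fu, rfl⟩ : ∃ fu, fuel = fu + 1 := ⟨fuel - 1, by omega⟩
      obtain rfl : i = j0 := by omega
      have hmem : (bNextOf grid n m)^[i] s ∈ seen := by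
        rw [hchar]
        exact Or.inr ⟨0, hj0, by simpa using heq.symm⟩
      have hcont : PySem.Set.contains seen ((bNextOf grid n m)^[i] s) = true := by
        rw [PySem.Set.contains_iff]; exact hmem
      simp only [midWalk, hcont, if_true]
      exact ⟨by push_cast; ring, hchar⟩
  | succ k ih =>
      intro i seen cnt fuel hik hkf hchar
      obtain ⟨fu, rfl⟩ : ∃ fu, fuel = fu + 1 := ⟨fuel - 1, by omega⟩
      have hiN := iter_mem _ _ (bNextOf_maps grid hn hm) i s hs0 hsN
      -- current state is fresh for the walk
      have hnot : ¬ ((bNextOf grid n m)^[i] s ∈ seen) := by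
        rw [hchar]
        rintro (hPcur | ⟨j, hj, hjeq⟩)
        · obtain ⟨j', hj'⟩ := hP _ hPcur
          rw [← Function.iterate_add_apply] at hj'
          exact absurd hj' (not_lt.2 (hall _))
        · -- f^[j] s = f^[i] s with j < i < j0 would give an earlier return
          have hji : j + (i - j) = i := by omega
          have h1 : (bNextOf grid n m)^[j] ((bNextOf grid n m)^[i-j] s)
              = (bNextOf grid n m)^[j] s := by
            rw [← Function.iterate_add_apply, hji, hjeq]
          have hmemij := iter_mem _ _ (bNextOf_maps grid hn hm) (i - j) s hs0 hsN
          have h2 : (bNextOf grid n m)^[i-j] s = s :=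
            iter_cancel _ _ (bNextOf_maps grid hn hm) (bNextOf_inj grid hn hm)
              j _ _ hmemij.1 hmemij.2 hs0 hsN h1
          have : 0 < i - j := by omega
          exact absurd h2 (ne_of_gt (hmin _ this (by omega)))
      have hcont : PySem.Set.contains seen ((bNextOf grid n m)^[i] s) = false := by
        rw [← Bool.not_eq_true, PySem.Set.contains_iff]; exact hnot
      simp only [midWalk, hcont, Bool.false_eq_true, if_false]
      rw [nxt_get grid hiN.1 hiN.2]
      have hstep : bNextOf grid n m ((bNextOf grid n m)^[i] s) = (bNextOf grid n m)^[i+1] s :=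
        (Function.iterate_succ_apply' (bNextOf grid n m) i s).symm
      rw [hstep]
      have hres := ih (i + 1) (PySem.Set.add seen ((bNextOf grid n m)^[i] s)) (cnt + 1) fu
        (by omega) (by omega)
        (by
          intro t
          rw [PySem.Set.mem_add, hchar]
          constructor
          · rintro ((hPt | ⟨j, hj, hjeq⟩) | rfl)
            · exact Or.inl hPt
            · exact Or.inr ⟨j, by omega, hjeq⟩
            · exact Or.inr ⟨i, by omega, rfl⟩
          · rintro (hPt | ⟨j, hj, hjeq⟩)
            · exact Or.inl (Or.inl hPt)
            · rcases Nat.lt_or_ge j i with h | h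
              · exact Or.inl (Or.inr ⟨j, h, hjeq⟩)
              · obtain rfl : j = i := by omega
                exact Or.inr hjeq.symm)
      refine ⟨?_, hres.2⟩
      rw [hres.1]; push_cast; ring

-- ---------- stage 5: the invariant over the outer scan and the main fold ----------

def InvS (grid : List String) (n m s : Int) (seen : PySem.Set Int) : Prop :=
  ∀ t, t ∈ seen ↔ (0 ≤ t ∧ t < 4*n*m ∧ ∃ j : Nat, (bNextOf grid n m)^[j] t < s)

lemma inv_step_stale (grid : List String) {n m s : Int} {seen : PySem.Set Int}
    (hInv : InvS grid n m s seen) (hst : ∃ j : Nat, (bNextOf grid n m)^[j] s < s) :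
    InvS grid n m (s + 1) seen := by
  intro t
  rw [hInv t]
  refine and_congr_right fun _ => and_congr_right fun _ => ⟨?_, ?_⟩
  · rintro ⟨j, hj⟩; exact ⟨j, by omega⟩
  · rintro ⟨j, hj⟩
    rcases lt_or_eq_of_le (by omega : (bNextOf grid n m)^[j] t ≤ s) with h | h
    · exact ⟨j, h⟩
    · obtain ⟨jw, hw⟩ := hst
      refine ⟨jw + j, ?_⟩
      rw [Function.iterate_add_apply, h]
      exact hw

lemma inv_step_fresh (grid : List String) {n m s : Int} {seen seen' : PySem.Set Int}
    (hn : 0 < n) (hm : 0 < m) (hs0 : 0 ≤ s) (hsN : s < 4*n*m)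
    (j0 : Nat) (hj0 : 0 < j0) (heq : (bNextOf grid n m)^[j0] s = s)
    (hInv : InvS grid n m s seen)
    (hchar : ∀ t, t ∈ seen' ↔ t ∈ seen ∨ ∃ j : Nat, j < j0 ∧ (bNextOf grid n m)^[j] s = t) :
    InvS grid n m (s + 1) seen' := by
  intro t
  rw [hchar t, hInv t]
  constructor
  · rintro (⟨ht0, ht1, j, hj⟩ | ⟨j, hj, rfl⟩)
    · exact ⟨ht0, ht1, j, by omega⟩
    · have hmem := iter_mem _ _ (bNextOf_maps grid hn hm) j s hs0 hsN
      refine ⟨hmem.1, hmem.2, j0 * j - j, ?_⟩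
      rw [← Function.iterate_add_apply]
      have hle : j ≤ j0 * j := Nat.le_mul_of_pos_left j hj0
      have : j0 * j - j + j = j0 * j := by omega
      rw [this, iter_period_mul _ s j0 heq j]
      omega
  · rintro ⟨ht0, ht1, j, hj⟩
    rcases lt_or_eq_of_le (by omega : (bNextOf grid n m)^[j] t ≤ s) with h | h
    · exact Or.inl ⟨ht0, ht1, j, h⟩
    · -- f^[j] t = s: t lies on s's cycle
      obtain ⟨j'', hj''⟩ := orbit_back _ _ (bNextOf_maps grid hn hm) (bNextOf_inj grid hn hm)
        t ht0 ht1 j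
      rw [h] at hj''
      refine Or.inr ⟨j'' % j0, Nat.mod_lt _ hj0, ?_⟩
      rw [← iter_period_mod _ s j0 hj0 heq j'']
      exact hj''

lemma fold_main (grid : List String) {n m : Int} (hn : 0 < n) (hm : 0 < m) :
    ∀ (k : Nat) (s : Int) (seen : PySem.Set Int) (out : List Int),
      (4*n*m - s).toNat = k → 0 ≤ s → InvS grid n m s seen →
      ((PySem.List.pyRange s (4*n*m) 1).foldl
          (fun (st : PySem.Set Int × List Int) c =>
            if PySem.Set.contains st.1 c then st
            else
              let w := midWalk (bNxt grid n m) ((4*n*m).toNat + 1) c st.1 0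
              (w.1, st.2 ++ [w.2])) (seen, out)).2
        = (PySem.List.pyRange s (4*n*m) 1).foldl
            (fun (o : List Int) c =>
              let w := bLoop grid n m c ((4*n*m).toNat + 1) (bNextOf grid n m c) 1
              if w.1 = c then o ++ [w.2] else o) out := by
  intro k
  induction k with
  | zero =>
      intro s seen out hk hs0 hInv
      rw [PySem.List.pyRange_one_eq_nil (by omega)]
      rfl
  | succ k ih =>
      intro s seen out hk hs0 hInv
      have hsN : s < 4*n*m := by omega
      rw [PySem.List.pyRange_one_cons hsN]
      simp only [List.foldl_cons]
      -- minimal positive return-or-drop index j0 for s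
      have hex : ∃ j : Nat, 0 < j ∧ (bNextOf grid n m)^[j] s ≤ s := by
        obtain ⟨d, hd0, _, hds⟩ := exists_return _ _ (bNextOf_maps grid hn hm)
          (bNextOf_inj grid hn hm) s hs0 hsN
        exact ⟨d, hd0, le_of_eq hds⟩
      set j0 := Nat.find hex with hj0def
      obtain ⟨hj0pos, hj0le⟩ := Nat.find_spec hex
      have hmin : ∀ j, 0 < j → j < j0 → s < (bNextOf grid n m)^[j] s := by
        intro j hjp hjlt
        have := Nat.find_min hex hjlt
        push_neg at this
        exact this hjp
      have hj0N : j0 ≤ (4*n*m).toNat := by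
        obtain ⟨d, hd0, hdN, hds⟩ := exists_return _ _ (bNextOf_maps grid hn hm)
          (bNextOf_inj grid hn hm) s hs0 hsN
        exact le_trans (Nat.find_min' hex ⟨hd0, le_of_eq hds⟩) hdN
      -- evaluate B's walk
      have hB : bLoop grid n m s ((4*n*m).toNat + 1) (bNextOf grid n m s) 1
          = ((bNextOf grid n m)^[j0] s, (j0 : Int)) := by
        have h1 : bNextOf grid n m s = (bNextOf grid n m)^[1] s := by
          rw [Function.iterate_one]
        have hc1 : ((1:Nat) : Int) = (1 : Int) := by norm_num
        rw [h1, ← hc1]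
        exact bLoop_run grid n m s j0 hj0pos hj0le hmin (j0 - 1) 1 ((4*n*m).toNat + 1)
          (by omega) (by omega) (by omega)
      rcases lt_or_eq_of_le hj0le with hlt | heq
      · -- stale s: on its cycle a smaller state exists; A skips, B drops below s
        have hmem : s ∈ seen := by
          rw [hInv s]
          exact ⟨hs0, hsN, j0, hlt⟩
        have hcont : PySem.Set.contains seen s = true := by
          rw [PySem.Set.contains_iff]; exact hmem
        have hne : ((bNextOf grid n m)^[j0] s) ≠ s := ne_of_lt hlt
        simp only [hcont, if_true, hB, hne, if_false]
        exact ih (s + 1) seen out (by omega) (by omega) (inv_step_stale grid hInv ⟨j0, hlt⟩)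
      · -- fresh s: minimum of its cycle; both walks count the cycle length j0
        have hall : ∀ j : Nat, s ≤ (bNextOf grid n m)^[j] s := fresh_all _ s j0 hj0pos heq hmin
        have hnot : ¬ s ∈ seen := by
          rw [hInv s]
          rintro ⟨_, _, j, hj⟩
          exact absurd hj (not_lt.2 (hall j))
        have hcont : PySem.Set.contains seen s = false := by
          rw [← Bool.not_eq_true, PySem.Set.contains_iff]; exact hnot
        have hA := midWalk_run grid n m s hn hm hs0 hsN j0 hj0pos heq hmin
          (fun t => t ∈ seen)
          (by
            intro t htm
            obtain ⟨_, _, j, hj⟩ := (hInv t).1 htm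
            exact ⟨j, hj⟩)
          j0 0 seen 0 ((4*n*m).toNat + 1) (by omega) (by omega)
          (by intro t; simp)
        rw [Function.iterate_zero_apply] at hA
        simp only [hcont, Bool.false_eq_true, if_false, hB]
        rw [if_pos heq]
        have hcnt : (midWalk (bNxt grid n m) ((4*n*m).toNat + 1) s seen 0).2 = (j0 : Int) := by
          rw [hA.1]; push_cast; ring
        rw [hcnt]
        refine ih (s + 1) _ (out ++ [(j0 : Int)]) (by omega) (by omega) ?_
        exact inv_step_fresh grid hn hm hs0 hsN j0 hj0pos heq hInv hA.2

lemma invS_zero (grid : List String) {n m : Int} (hn : 0 < n) (hm : 0 < m) :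
    InvS grid n m 0 PySem.Set.empty := by
  intro t
  constructor
  · intro h; exact absurd h (List.not_mem_nil)
  · rintro ⟨ht0, ht1, j, hj⟩
    have := iter_mem _ _ (bNextOf_maps grid hn hm) j t ht0 ht1
    omega

lemma mid_eq_alt (grid : List String) (hne : grid ≠ []) :
    midSolution grid = solution_alt grid := by
  simp only [midSolution, solution_alt]
  have hn : (0 : Int) < PySem.List.len grid := by
    rw [PySem.List.len_eq]
    exact_mod_cast List.length_pos_of_ne_nil hne
  have hm : (0 : Int) ≤ PySem.Str.len (PySem.List.pyGetD grid 0 "") := by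
    rw [PySem.Str.len_eq]; positivity
  apply congrArg (fun l => PySem.List.sorted l (fun v => v) false)
  rcases lt_or_eq_of_le hm with hm' | hm'
  · exact fold_main grid hn hm' _ 0 PySem.Set.empty [] rfl le_rfl (invS_zero grid hn hm')
  · rw [← hm', mul_zero, PySem.List.pyRange_one_eq_nil le_rfl]
    rfl

-- ===== VERDICT (by name: the statement is the Claim_ definition above) =====
theorem solution_spec : Claim_equal_solution := by
  unfold Claim_equal_solution Spec_solution Pre_solution
  intro grid _ hpre
  rw [solution_eq_mid grid hpre.1, mid_eq_alt grid hpre.1]
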